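-- pv_equiv track=rewrite | github.com/JHU-CLSP/Confidence-Estimation-TrustNLP2023 | src/swapped_pairs/compute_swapped_pairs.py | compute_swapped_pairs
-- ===== SOURCE A (Python) =====
-- def compute_swapped_pairs(arr):
--     inv_count = 0
--     n = len(arr)
--
--     for i in range(n):
--         for j in range(i + 1, n):
--             if arr[i] < arr[j]:
--                 inv_count += 1
--
--     return inv_count
-- ===== SOURCE B (Python) =====
-- def compute_swapped_pairs(arr):
--     # Merge-sort based counting of pairs i < j with arr[i] < arr[j]:
--     # when merging two sorted halves, an element taken from the left half
--     # is smaller than every element still remaining in the right half.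
--     def msort(xs):
--         if len(xs) <= 1:
--             return xs, 0
--         mid = len(xs) // 2
--         left, cl = msort(xs[:mid])
--         right, cr = msort(xs[mid:])
--         merged = []
--         c = cl + cr
--         i, j = 0, 0
--         while i < len(left) and j < len(right):
--             if left[i] < right[j]:
--                 c += len(right) - j
--                 merged.append(left[i])
--                 i += 1
--             else:
--                 merged.append(right[j])
--                 j += 1
--         merged += left[i:]
--         merged += right[j:]
--         return merged, c
--     return msort(arr)[1]
-- ===== Notes on version B (the rewrite author's own statement) =====
-- stated objective: faster
-- what changed: Replaces the quadratic nested index loops by merge-sort counting: while merging sorted halves, each element taken from the left half contributes one counted pair per element still remaining in the right half.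
import Mathlib
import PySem

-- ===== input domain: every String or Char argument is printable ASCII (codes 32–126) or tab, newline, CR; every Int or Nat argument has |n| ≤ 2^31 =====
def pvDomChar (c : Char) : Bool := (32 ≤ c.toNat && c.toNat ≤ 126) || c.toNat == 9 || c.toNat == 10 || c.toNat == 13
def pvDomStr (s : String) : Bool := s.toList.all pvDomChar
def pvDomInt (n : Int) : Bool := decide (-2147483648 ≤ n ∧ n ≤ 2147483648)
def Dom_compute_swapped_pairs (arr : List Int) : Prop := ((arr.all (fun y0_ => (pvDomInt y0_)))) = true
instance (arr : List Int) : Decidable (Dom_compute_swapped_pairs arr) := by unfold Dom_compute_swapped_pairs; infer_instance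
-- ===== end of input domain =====

-- B replaces A's quadratic nested index loops by merge-sort pair counting; both are total, no mutation.

-- ===== PORT A =====
def compute_swapped_pairs (arr : List Int) : Int :=
  let n : Int := PySem.List.len arr
  (PySem.List.pyRange 0 n 1).foldl (fun inv i =>
    (PySem.List.pyRange (i + 1) n 1).foldl (fun inv j =>
      if PySem.List.pyGetD arr i 0 < PySem.List.pyGetD arr j 0 then inv + 1 else inv) inv) 0

-- ===== PORT B =====
-- the while-merge loop of Source B: the index pair (i, j) is represented by the remaining suffixes of left/right;
-- 'c += len(right) - j' is the length of the remaining right suffix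
def pvMergeLoop : List Int → List Int → List Int → Int → List Int × Int
  | x :: l, y :: r, acc, c =>
    if x < y then pvMergeLoop l (y :: r) (acc ++ [x]) (c + PySem.List.len (y :: r))
    else pvMergeLoop (x :: l) r (acc ++ [y]) c
  | l, r, acc, c => (acc ++ l ++ r, c)
termination_by l r _ _ => l.length + r.length

-- msort of Source B; xs[:mid] / xs[mid:] with mid = len(xs)//2 are exactly take/drop at mid
def pvMsort (xs : List Int) : List Int × Int :=
  if xs.length ≤ 1 then (xs, 0)
  else
    let mid := xs.length / 2
    let lc := pvMsort (xs.take mid)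
    let rc := pvMsort (xs.drop mid)
    let mc := pvMergeLoop lc.1 rc.1 [] (lc.2 + rc.2)
    (mc.1, mc.2)
termination_by xs.length
decreasing_by
  · simp; omega
  · simp; omega

def compute_swapped_pairs_alt (arr : List Int) : Int := (pvMsort arr).2

-- ===== PRECONDITION & SPEC =====
def Spec_compute_swapped_pairs (arr : List Int) (out : Int) : Prop := out = compute_swapped_pairs_alt arr
instance (arr : List Int) (out : Int) : Decidable (Spec_compute_swapped_pairs arr out) := by unfold Spec_compute_swapped_pairs; infer_instance

-- ===== CLAIM (what is proved, stated in full; the proofs are below) =====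
def Claim_equal_compute_swapped_pairs : Prop := ∀ (arr : List Int), Dom_compute_swapped_pairs arr → Spec_compute_swapped_pairs arr (compute_swapped_pairs arr)

-- ===== LEMMAS AND PROOFS =====

-- number of pairs i < j with xs[i] < xs[j], head-first
def pvCountPairs : List Int → Int
  | [] => 0
  | x :: xs => ((xs.countP (fun y => decide (x < y)) : Nat) : Int) + pvCountPairs xs

-- number of pairs (x from a, y from b) with x < y
def pvCross (a b : List Int) : Int :=
  (a.map (fun x => ((b.countP (fun y => decide (x < y)) : Nat) : Int))).sum

-- proof mirrors of pvMergeLoop: the merged output and the count it accumulates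
def pvPMerge : List Int → List Int → List Int
  | x :: l, y :: r => if x < y then x :: pvPMerge l (y :: r) else y :: pvPMerge (x :: l) r
  | l, r => l ++ r
termination_by l r => l.length + r.length

def pvMCount : List Int → List Int → Int
  | x :: l, y :: r => if x < y then (1 + (r.length : Int)) + pvMCount l (y :: r) else pvMCount (x :: l) r
  | _, _ => 0
termination_by l r => l.length + r.length

-- ---- A's loops compute pvCountPairs ----

theorem pvA_inner (arr : List Int) (x : Int) (k : ℕ) (c : Int) :
    (PySem.List.pyRange (k : Int) (arr.length : Int) 1).foldl
      (fun inv j => if x < PySem.List.pyGetD arr j 0 then inv + 1 else inv) c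
    = c + ((arr.drop k).countP (fun y => decide (x < y)) : Int) := by
  have h := PySem.List.foldl_pyRange_pyGetD (xs := arr) (a := (k : Int)) (d := 0)
    (f := fun inv y => if x < y then inv + 1 else inv) (init := c) (by positivity)
  simp only [PySem.List.len_eq] at h
  rw [h]
  simp only [Int.toNat_natCast]
  have h2 : (fun inv y => if x < y then inv + 1 else inv)
      = (fun (inv : Int) y => if (fun y => decide (x < y)) y = true then inv + 1 else inv) := by
    funext inv y; simp
  rw [h2, PySem.List.foldl_count_if]

theorem pvA_outer (arr : List Int) (k : ℕ) (c : Int) :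
    (PySem.List.pyRange (k : Int) (arr.length : Int) 1).foldl
      (fun inv i =>
        (PySem.List.pyRange (i + 1) (arr.length : Int) 1).foldl
          (fun inv j => if PySem.List.pyGetD arr i 0 < PySem.List.pyGetD arr j 0 then inv + 1 else inv) inv) c
    = c + pvCountPairs (arr.drop k) := by
  by_cases hk : k < arr.length
  · rw [PySem.List.pyRange_one_cons (by exact_mod_cast hk)]
    rw [List.foldl_cons]
    have hc : ((k : Int) + 1) = ((k + 1 : ℕ) : Int) := by push_cast; ring
    rw [hc]
    have hget : PySem.List.pyGetD arr (k : Int) 0 = arr[k] := by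
      rw [PySem.List.pyGetD_natCast]
      exact List.getD_eq_getElem arr 0 hk
    rw [hget, pvA_inner]
    rw [pvA_outer arr (k + 1) (c + ((arr.drop (k+1)).countP (fun y => decide (arr[k] < y)) : Int))]
    rw [List.drop_eq_getElem_cons hk, pvCountPairs]
    ring
  · rw [PySem.List.pyRange_one_eq_nil (by exact_mod_cast not_lt.mp hk)]
    rw [List.drop_eq_nil_of_le (not_lt.mp hk)]
    simp [pvCountPairs]
termination_by arr.length - k

theorem pvA_eq_countPairs (arr : List Int) : compute_swapped_pairs arr = pvCountPairs arr := by
  have h := pvA_outer arr 0 0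
  simpa [compute_swapped_pairs] using h

-- ---- pvCross bookkeeping ----

theorem pvCross_nil_right (a : List Int) : pvCross a [] = 0 := by
  simp [pvCross]

theorem pvCross_cons_left (x : Int) (a b : List Int) :
    pvCross (x :: a) b = ((b.countP (fun y => decide (x < y)) : Nat) : Int) + pvCross a b := by
  simp [pvCross]

theorem pvCross_cons_right (a : List Int) (y : Int) (b : List Int) :
    pvCross a (y :: b) = pvCross a b + ((a.countP (fun z => decide (z < y)) : Nat) : Int) := by
  induction a with
  | nil => simp [pvCross]
  | cons x a ih =>
    rw [pvCross_cons_left, pvCross_cons_left, ih, List.countP_cons, List.countP_cons]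
    by_cases h : x < y <;> simp [h] <;> omega

theorem pvCountPairs_append (a b : List Int) :
    pvCountPairs (a ++ b) = pvCountPairs a + pvCountPairs b + pvCross a b := by
  induction a with
  | nil => simp [pvCountPairs, pvCross]
  | cons x a ih =>
    simp only [List.cons_append, pvCountPairs, ih, pvCross_cons_left, List.countP_append]
    push_cast; ring

theorem pvCross_perm_left {a a' : List Int} (h : a.Perm a') (b : List Int) :
    pvCross a b = pvCross a' b :=
  List.Perm.sum_eq (h.map _)

theorem pvCross_perm_right (a : List Int) {b b' : List Int} (h : b.Perm b') :
    pvCross a b = pvCross a b' := by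
  unfold pvCross
  congr 1
  refine List.map_congr_left fun x _ => ?_
  rw [h.countP_eq]

-- ---- the merge loop: output, permutation, sortedness, count ----

theorem pvMergeLoop_eq (l r acc : List Int) (c : Int) :
    pvMergeLoop l r acc c = (acc ++ pvPMerge l r, c + pvMCount l r) := by
  induction l, r using pvPMerge.induct generalizing acc c with
  | case1 x l y r h ih =>
    rw [pvMergeLoop, pvPMerge, pvMCount]
    simp only [h, if_true, ih]
    simp [PySem.List.len]
    ring
  | case2 x l y r h ih =>
    rw [pvMergeLoop, pvPMerge, pvMCount]
    simp only [h, if_false, ih]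
    simp
  | case3 l r h =>
    rcases l with _ | ⟨x, l⟩
    · simp [pvMergeLoop, pvPMerge, pvMCount]
    · rcases r with _ | ⟨y, r⟩
      · simp [pvMergeLoop, pvPMerge, pvMCount]
      · exact (h x l y r rfl rfl).elim

theorem pvPMerge_perm (l r : List Int) : (pvPMerge l r).Perm (l ++ r) := by
  induction l, r using pvPMerge.induct with
  | case1 x l y r h ih => simpa [pvPMerge, h] using ih.cons x
  | case2 x l y r h ih =>
    rw [pvPMerge]; simp only [h, if_false]
    exact (ih.cons y).trans (List.perm_middle).symm
  | case3 l r h =>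
    rcases l with _ | ⟨x, l⟩
    · simp [pvPMerge]
    · rcases r with _ | ⟨y, r⟩
      · simp [pvPMerge]
      · exact (h x l y r rfl rfl).elim

theorem pvPMerge_sorted {l r : List Int} (hl : l.Pairwise (· ≤ ·)) (hr : r.Pairwise (· ≤ ·)) :
    (pvPMerge l r).Pairwise (· ≤ ·) := by
  induction l, r using pvPMerge.induct with
  | case1 x l y r h ih =>
    rw [pvPMerge]; simp only [h, if_true]
    rw [List.pairwise_cons]
    refine ⟨?_, ih (List.pairwise_cons.mp hl).2 hr⟩
    intro z hz
    rcases List.mem_append.mp ((pvPMerge_perm l (y :: r)).mem_iff.mp hz) with hz | hz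
    · exact (List.pairwise_cons.mp hl).1 z hz
    · rcases List.mem_cons.mp hz with rfl | hz
      · exact le_of_lt h
      · exact le_of_lt (lt_of_lt_of_le h ((List.pairwise_cons.mp hr).1 z hz))
  | case2 x l y r h ih =>
    rw [pvPMerge]; simp only [h, if_false]
    rw [List.pairwise_cons]
    refine ⟨?_, ih hl (List.pairwise_cons.mp hr).2⟩
    intro z hz
    have hyx : y ≤ x := not_lt.mp h
    rcases List.mem_append.mp ((pvPMerge_perm (x :: l) r).mem_iff.mp hz) with hz | hz
    · rcases List.mem_cons.mp hz with rfl | hz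
      · exact hyx
      · exact hyx.trans ((List.pairwise_cons.mp hl).1 z hz)
    · exact (List.pairwise_cons.mp hr).1 z hz
  | case3 l r h =>
    rcases l with _ | ⟨x, l⟩
    · simpa [pvPMerge] using hr
    · rcases r with _ | ⟨y, r⟩
      · simpa [pvPMerge] using hl
      · exact (h x l y r rfl rfl).elim

theorem pvMCount_eq_cross {l r : List Int} (hl : l.Pairwise (· ≤ ·)) (hr : r.Pairwise (· ≤ ·)) :
    pvMCount l r = pvCross l r := by
  induction l, r using pvMCount.induct with
  | case1 x l y r h ih =>
    rw [pvMCount]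
    simp only [h, if_true]
    rw [ih (List.pairwise_cons.mp hl).2 hr, pvCross_cons_left]
    have hcnt : (y :: r).countP (fun z => decide (x < z)) = (y :: r).length := by
      rw [List.countP_eq_length]
      intro z hz
      rcases List.mem_cons.mp hz with rfl | hz
      · simpa using h
      · simpa using lt_of_lt_of_le h ((List.pairwise_cons.mp hr).1 z hz)
    rw [hcnt]
    simp; ring
  | case2 x l y r h ih =>
    rw [pvMCount]
    simp only [h, if_false]
    rw [ih hl (List.pairwise_cons.mp hr).2, pvCross_cons_right]
    have hy : y ≤ x := not_lt.mp h
    have hcnt : (x :: l).countP (fun z => decide (z < y)) = 0 := by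
      rw [List.countP_eq_zero]
      intro z hz
      rcases List.mem_cons.mp hz with rfl | hz
      · simpa using not_lt.mpr hy
      · exact by simpa using not_lt.mpr (hy.trans ((List.pairwise_cons.mp hl).1 z hz))
    rw [hcnt]; simp
  | case3 l r h =>
    rcases l with _ | ⟨x, l⟩
    · rw [pvMCount.eq_def]; simp [pvCross]
    · rcases r with _ | ⟨y, r⟩
      · rw [pvMCount.eq_def]; simp [pvCross_nil_right]
      · exact (h x l y r rfl rfl).elim

-- ---- B computes pvCountPairs ----

theorem pvMsort_spec (xs : List Int) :
    (pvMsort xs).1.Perm xs ∧ (pvMsort xs).1.Pairwise (· ≤ ·) ∧ (pvMsort xs).2 = pvCountPairs xs := by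
  induction xs using pvMsort.induct with
  | case1 xs h =>
    rw [pvMsort, if_pos h]
    refine ⟨List.Perm.refl _, ?_, ?_⟩
    · match xs, h with
      | [], _ => simp
      | [x], _ => simp
    · match xs, h with
      | [], _ => simp [pvCountPairs]
      | [x], _ => simp [pvCountPairs]
  | case2 xs h mid ihl ihr =>
    rw [pvMsort, if_neg h]
    simp only
    obtain ⟨pl, sl, cl⟩ := ihl
    obtain ⟨pr, sr, cr⟩ := ihr
    rw [pvMergeLoop_eq]
    simp only [List.nil_append]
    have hperm : (pvPMerge (pvMsort (xs.take mid)).1 (pvMsort (xs.drop mid)).1).Perm xs := by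
      refine (pvPMerge_perm _ _).trans ?_
      refine ((pl.append pr).trans ?_)
      rw [List.take_append_drop]
    refine ⟨hperm, pvPMerge_sorted sl sr, ?_⟩
    rw [pvMCount_eq_cross sl sr, cl, cr]
    rw [pvCross_perm_left pl, pvCross_perm_right _ pr]
    conv_rhs => rw [← List.take_append_drop mid xs]
    rw [pvCountPairs_append]

-- ===== VERDICT (by name: the statement is the Claim_ definition above) =====
theorem compute_swapped_pairs_spec : Claim_equal_compute_swapped_pairs := by
  intro arr _
  show compute_swapped_pairs arr = compute_swapped_pairs_alt arr
  rw [pvA_eq_countPairs, compute_swapped_pairs_alt, (pvMsort_spec arr).2.2]
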